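-- pv_equiv track=rewrite | github.com/lorenzo9598/flutterator | generators/helpers/validation.py | parse_fields_string
-- ===== SOURCE A (Python) =====
-- from typing import Optional, List, Tuple, Dict
--
-- def parse_fields_string(fields_str: str) -> List[Tuple[str, str]]:
--     """
--     Parse a fields string into a list of (name, type) tuples.
--     Handles commas inside angle brackets (e.g., Map<String, int>).
--
--     Args:
--         fields_str: Fields string in format "name:type,name:type"
--
--     Returns:
--         List of (field_name, field_type) tuples
--     """
--     # Split on commas that are NOT inside angle brackets
--     tokens = []
--     current = []
--     depth = 0
--     for ch in fields_str:
--         if ch == '<':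
--             depth += 1
--             current.append(ch)
--         elif ch == '>':
--             depth -= 1
--             current.append(ch)
--         elif ch == ',' and depth == 0:
--             tokens.append(''.join(current))
--             current = []
--         else:
--             current.append(ch)
--     if current:
--         tokens.append(''.join(current))
--
--     fields = []
--     for field_str in tokens:
--         field_str = field_str.strip()
--         if not field_str:
--             continue
--
--         if ':' not in field_str:
--             raise ValueError(f"Invalid field format: '{field_str}'. Expected format: name:type")
--
--         parts = field_str.split(':', 1)
--         field_name = parts[0].strip()
--         field_type = parts[1].strip()
--
--         if not field_name:
--             raise ValueError(f"Field name cannot be empty in: '{field_str}'")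
--         if not field_type:
--             raise ValueError(f"Field type cannot be empty in: '{field_str}'")
--
--         fields.append((field_name, field_type))
--
--     return fields
-- ===== SOURCE B (Python) =====
-- from typing import List, Tuple
--
--
-- def parse_fields_string(fields_str: str) -> List[Tuple[str, str]]:
--     """
--     Parse a fields string into a list of (name, type) tuples.
--     Split-then-merge strategy: split the whole string on every comma at once,
--     then re-join the pieces whose commas sit inside angle brackets by tracking
--     a running bracket depth; a token is emitted whenever the depth is back to 0.
--     """
--     tokens = []
--     buf = None
--     depth = 0
--     for piece in fields_str.split(','):
--         depth += piece.count('<') - piece.count('>')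
--         buf = piece if buf is None else buf + ',' + piece
--         if depth == 0:
--             tokens.append(buf)
--             buf = None
--     if buf is not None:
--         tokens.append(buf)
--
--     fields = []
--     for token in tokens:
--         token = token.strip()
--         if not token:
--             continue
--         name, sep, ftype = token.partition(':')
--         if not sep:
--             raise ValueError(f"Invalid field format: '{token}'. Expected format: name:type")
--         name = name.strip()
--         ftype = ftype.strip()
--         if not name:
--             raise ValueError(f"Field name cannot be empty in: '{token}'")
--         if not ftype:
--             raise ValueError(f"Field type cannot be empty in: '{token}'")
--         fields.append((name, ftype))
--     return fields
-- ===== Notes on version B (the rewrite author's own statement) =====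
-- stated objective: alternative
-- what changed: A's per-character state machine (accumulating characters and splitting at depth-0 commas) is replaced by splitting the whole string on every comma at once and re-merging pieces on a running bracket depth (emit when depth returns to 0), and the per-token split-on-first-colon by str.partition (no change in behaviour).
import Mathlib
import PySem

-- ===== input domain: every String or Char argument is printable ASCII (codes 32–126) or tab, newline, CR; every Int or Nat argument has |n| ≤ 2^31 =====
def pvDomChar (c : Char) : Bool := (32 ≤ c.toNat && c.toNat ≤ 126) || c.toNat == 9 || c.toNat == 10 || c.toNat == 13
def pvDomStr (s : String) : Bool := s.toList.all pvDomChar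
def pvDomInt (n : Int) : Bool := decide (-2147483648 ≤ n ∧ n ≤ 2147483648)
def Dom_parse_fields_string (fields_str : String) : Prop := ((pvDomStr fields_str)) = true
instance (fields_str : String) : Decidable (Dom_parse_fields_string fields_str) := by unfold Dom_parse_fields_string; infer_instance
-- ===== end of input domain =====

-- B replaces A's per-character comma/bracket state machine by split-on-every-comma followed
-- by re-merging the pieces on a running bracket depth (objective: alternative algorithm).
-- Python A raises ValueError on malformed tokens; those inputs are excluded by Pre_ and both
-- ports simply skip such a token there.

-- ===== PORT A =====
-- state = (tokens, current, depth); one step of A's per-character loop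
def pvAStep (st : List (List Char) × List Char × Int) (ch : Char) :
    List (List Char) × List Char × Int :=
  if ch = '<' then (st.1, st.2.1 ++ [ch], st.2.2 + 1)
  else if ch = '>' then (st.1, st.2.1 ++ [ch], st.2.2 - 1)
  else if ch = ',' ∧ st.2.2 = 0 then (st.1 ++ [st.2.1], [], st.2.2)
  else (st.1, st.2.1 ++ [ch], st.2.2)

-- body of A's validation loop ('raise ValueError' aborts Python A: such inputs are outside
-- Pre_, the port skips the offending token there)
def pvAField (acc : List (String × String)) (t : List Char) : List (String × String) :=
  let f := PySem.Chars.strip t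
  if f = [] then acc
  else if PySem.Chars.isIn [':'] f = false then acc   -- raise ValueError (outside Pre_)
  else
    -- parts = field_str.split(':', 1); ':' is present, so parts = [parts[0], parts[1]]
    let parts := PySem.Chars.splitOnMax f [':'] 1
    let name := PySem.Chars.strip (PySem.List.pyGetD parts 0 [])
    let ty := PySem.Chars.strip (PySem.List.pyGetD parts 1 [])
    if name = [] then acc        -- raise ValueError (outside Pre_)
    else if ty = [] then acc     -- raise ValueError (outside Pre_)
    else acc ++ [(String.ofList name, String.ofList ty)]

def parse_fields_string (fields_str : String) : List (String × String) :=
  let st := fields_str.toList.foldl pvAStep ([], [], 0)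
  let tokens := if st.2.1 ≠ [] then st.1 ++ [st.2.1] else st.1
  tokens.foldl pvAField []

-- ===== PORT B =====
-- state = (tokens, buf : Option, depth); one step of B's per-piece loop
def pvBStep (st : List (List Char) × Option (List Char) × Int) (p : List Char) :
    List (List Char) × Option (List Char) × Int :=
  let d := st.2.2 + (PySem.Chars.count p ['<'] : Int) - (PySem.Chars.count p ['>'] : Int)
  let b := match st.2.1 with
    | none => p
    | some b0 => b0 ++ [','] ++ p
  if d = 0 then (st.1 ++ [b], none, d) else (st.1, some b, d)

-- body of B's validation loop; token.partition(':') ported by hand via the index of the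
-- first ':' (exact: partition splits at the first occurrence, sep is empty iff ':' absent)
def pvBField (acc : List (String × String)) (t : List Char) : List (String × String) :=
  let f := PySem.Chars.strip t
  if f = [] then acc
  else
    let i := PySem.Chars.find f [':']
    if i = -1 then acc           -- raise ValueError (outside Pre_)
    else
      let name := PySem.Chars.strip (f.take i.toNat)
      let ty := PySem.Chars.strip (f.drop (i.toNat + 1))
      if name = [] then acc      -- raise ValueError (outside Pre_)
      else if ty = [] then acc   -- raise ValueError (outside Pre_)
      else acc ++ [(String.ofList name, String.ofList ty)]

def parse_fields_string_alt (fields_str : String) : List (String × String) :=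
  let pieces := PySem.Chars.splitOn fields_str.toList [',']
  let st := pieces.foldl pvBStep ([], none, 0)
  let tokens := match st with
    | (toks, some b, _) => toks ++ [b]
    | (toks, none, _) => toks
  tokens.foldl pvBField []

-- ===== PRECONDITION & SPEC =====
-- reference top-level tokenizer used only to STATE the precondition: (current piece,
-- later pieces), splitting at the commas that sit at angle-bracket depth 0
def pvSpec (l : List Char) (d : Int) : List Char × List (List Char) :=
  match l with
  | [] => ([], [])
  | c :: r =>
    if c = ',' ∧ d = 0 then ([], (pvSpec r d).1 :: (pvSpec r d).2)
    else
      let d' := if c = '<' then d + 1 else if c = '>' then d - 1 else d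
      ((c :: (pvSpec r d').1), (pvSpec r d').2)

-- Pre_ excludes exactly the inputs on which Python A raises ValueError: some nonblank
-- top-level token that lacks a colon, or whose name or type next to its first colon is blank.
def Pre_parse_fields_string (fields_str : String) : Prop :=
  ∀ t ∈ (pvSpec fields_str.toList 0).1 :: (pvSpec fields_str.toList 0).2,
    PySem.Chars.strip t ≠ [] →
      (PySem.Chars.find (PySem.Chars.strip t) [':'] ≠ -1 ∧
       PySem.Chars.strip ((PySem.Chars.strip t).take
         (PySem.Chars.find (PySem.Chars.strip t) [':']).toNat) ≠ [] ∧
       PySem.Chars.strip ((PySem.Chars.strip t).drop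
         ((PySem.Chars.find (PySem.Chars.strip t) [':']).toNat + 1)) ≠ [])
instance (fields_str : String) : Decidable (Pre_parse_fields_string fields_str) := by
  unfold Pre_parse_fields_string; infer_instance

def pvWitness_parse_fields_string : String := "id:int, items : Map<String, int>"

def Spec_parse_fields_string (fields_str : String) (out : List (String × String)) : Prop :=
  out = parse_fields_string_alt fields_str
instance (fields_str : String) (out : List (String × String)) :
    Decidable (Spec_parse_fields_string fields_str out) := by
  unfold Spec_parse_fields_string; infer_instance

-- ===== CLAIM (what is proved, stated in full; the proofs are below) =====
def Claim_equal_parse_fields_string : Prop :=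
  ∀ (fields_str : String), Dom_parse_fields_string fields_str →
    Pre_parse_fields_string fields_str →
    Spec_parse_fields_string fields_str (parse_fields_string fields_str)

-- ===== LEMMAS AND PROOFS =====

def pvSplit1 : List Char → Option (List Char × List Char)
  | [] => none
  | c :: r => if c = ':' then some ([], r) else (pvSplit1 r).map (fun ab => (c :: ab.1, ab.2))

theorem pv_count_go (c : Char) (l : List Char) : ∀ (fuel acc : Nat), l.length ≤ fuel →
    PySem.Chars.count.go [c] fuel l acc = acc + l.count c := by
  induction l with
  | nil =>
    intro fuel acc _
    cases fuel <;> rw [PySem.Chars.count.go.eq_def] <;> simp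
  | cons x t ih =>
    intro fuel acc h
    cases fuel with
    | zero => simp at h
    | succ f =>
      rw [PySem.Chars.count.go.eq_def]
      by_cases hx : c == x
      · simp only [List.isPrefixOf, hx, Bool.true_and, List.isPrefixOf_nil_left, if_pos]
        have := ih f (acc+1) (by simpa using h)
        simp only [List.length_singleton, List.drop_succ_cons, List.drop_zero, this]
        simp at hx; subst hx
        simp [List.count_cons]
        omega
      · simp only [List.isPrefixOf, hx, Bool.false_and, Bool.false_eq_true, if_false]
        rw [ih f acc (by simpa using h)]
        simp at hx
        simp [List.count_cons, Ne.symm hx]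

theorem pv_count_single (l : List Char) (c : Char) : PySem.Chars.count l [c] = l.count c := by
  rw [PySem.Chars.count]
  simp [pv_count_go c l l.length 0 (le_refl _)]

theorem pv_find_go (f : List Char) : ∀ (k : Nat),
    PySem.Chars.find.go [':'] f k =
      (match pvSplit1 f with
       | none => -1
       | some ab => (k : Int) + ab.1.length) := by
  induction f with
  | nil => intro k; rw [PySem.Chars.find.go]; simp [pvSplit1]
  | cons x t ih =>
    intro k
    rw [PySem.Chars.find.go]
    simp only [List.isPrefixOf, List.isPrefixOf_nil_left, Bool.and_true]
    by_cases hx : x = ':'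
    · simp [hx, pvSplit1]
    · have hx' : ((':' : Char) == x) = false := by simp [Ne.symm hx]
      simp only [hx', Bool.false_eq_true, if_false, ih (k+1), pvSplit1, hx]
      cases h : pvSplit1 t with
      | none => simp
      | some ab => simp [h]; push_cast; ring

theorem pv_find_split1 (f : List Char) :
    PySem.Chars.find f [':'] =
      (match pvSplit1 f with
       | none => -1
       | some ab => (ab.1.length : Int)) := by
  rw [PySem.Chars.find, pv_find_go f 0]
  cases h : pvSplit1 f <;> simp [h]

theorem pv_split1_decomp (f : List Char) :
    ∀ a b, pvSplit1 f = some (a, b) → f = a ++ ':' :: b := by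
  induction f with
  | nil => intro a b h; simp [pvSplit1] at h
  | cons x t ih =>
    intro a b h
    by_cases hx : x = ':'
    · simp [pvSplit1, hx] at h
      simp [hx, h.1, ← h.2]
    · simp [pvSplit1, hx] at h
      obtain ⟨a', hab, h1⟩ := h
      rw [← h1]
      simp [ih a' b hab]

-- pieces of fields_str.split(',') as (first piece, later pieces)
def pvPieces : List Char → List Char × List (List Char)
  | [] => ([], [])
  | c :: r =>
    if c = ',' then ([], (pvPieces r).1 :: (pvPieces r).2)
    else (c :: (pvPieces r).1, (pvPieces r).2)

theorem pv_splitOn_go (l : List Char) : ∀ (fuel : Nat), l.length ≤ fuel →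
    ∀ (cur : List Char) (acc : List (List Char)),
    PySem.Chars.splitOn.go [','] fuel l cur acc =
      acc.reverse ++ (cur.reverse ++ (pvPieces l).1) :: (pvPieces l).2 := by
  induction l with
  | nil =>
    intro fuel _ cur acc
    cases fuel <;> rw [PySem.Chars.splitOn.go.eq_def] <;> simp [pvPieces]
  | cons x t ih =>
    intro fuel h cur acc
    cases fuel with
    | zero => simp at h
    | succ f =>
      rw [PySem.Chars.splitOn.go.eq_def]
      by_cases hx : x = ','
      · simp only [List.isPrefixOf, hx, beq_self_eq_true, Bool.true_and,
          List.isPrefixOf_nil_left, if_pos]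
        have := ih f (by simpa using h) [] (cur.reverse :: acc)
        simp only [List.length_singleton, List.drop_succ_cons, List.drop_zero, this]
        simp [pvPieces, hx]
      · have hx' : ((',' : Char) == x) = false := by simp [Ne.symm hx]
        simp only [List.isPrefixOf, hx', Bool.false_and, Bool.false_eq_true, if_false]
        rw [ih f (by simpa using h) (x :: cur) acc]
        simp [pvPieces, hx]

theorem pv_splitOn_comma (l : List Char) :
    PySem.Chars.splitOn l [','] = (pvPieces l).1 :: (pvPieces l).2 := by
  rw [PySem.Chars.splitOn, pv_splitOn_go l (l.length + 1) (by omega) [] []]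
  simp

theorem pv_splitOnMax_go_zero (fuel : Nat) (l cur : List Char) (acc : List (List Char)) :
    PySem.Chars.splitOnMax.go [':'] fuel 0 l cur acc = ((cur.reverse ++ l) :: acc).reverse := by
  cases fuel with
  | zero => rw [PySem.Chars.splitOnMax.go.eq_def]
  | succ f =>
    cases l with
    | nil => rw [PySem.Chars.splitOnMax.go.eq_def]; simp
    | cons x t => rw [PySem.Chars.splitOnMax.go.eq_def]; simp

theorem pv_splitOnMax_go_one (f : List Char) : ∀ (fuel : Nat), f.length ≤ fuel →
    ∀ (cur : List Char) (acc : List (List Char)),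
    PySem.Chars.splitOnMax.go [':'] fuel 1 f cur acc =
      acc.reverse ++ (match pvSplit1 f with
        | none => [cur.reverse ++ f]
        | some ab => [cur.reverse ++ ab.1, ab.2]) := by
  induction f with
  | nil =>
    intro fuel _ cur acc
    cases fuel <;> rw [PySem.Chars.splitOnMax.go.eq_def] <;> simp [pvSplit1]
  | cons x t ih =>
    intro fuel h cur acc
    cases fuel with
    | zero => simp at h
    | succ fl =>
      rw [PySem.Chars.splitOnMax.go.eq_def]
      by_cases hx : x = ':'
      · simp only [List.isPrefixOf, hx, beq_self_eq_true, Bool.true_and,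
          List.isPrefixOf_nil_left, if_pos, if_neg (by omega : ¬ (1 : Nat) = 0)]
        have := pv_splitOnMax_go_zero fl t [] (cur.reverse :: acc)
        simp only [List.length_singleton, List.drop_succ_cons, List.drop_zero]
        norm_num
        rw [this]
        simp [pvSplit1, hx]
      · have hx' : (((':' : Char)) == x) = false := by simp [Ne.symm hx]
        simp only [List.isPrefixOf, hx', Bool.false_and, Bool.false_eq_true, if_false,
          if_neg (by omega : ¬ (1 : Nat) = 0)]
        rw [ih fl (by simpa using h) (x :: cur) acc]
        simp only [pvSplit1, hx]
        cases hs : pvSplit1 t with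
        | none => simp
        | some ab => simp [hx]

theorem pv_splitOnMax_one (f : List Char) :
    PySem.Chars.splitOnMax f [':'] 1 =
      (match pvSplit1 f with
        | none => [f]
        | some ab => [ab.1, ab.2]) := by
  rw [PySem.Chars.splitOnMax]
  rw [if_neg (by omega : ¬ (1 : Int) < 0)]
  have : (1 : Int).toNat = 1 := rfl
  rw [this, pv_splitOnMax_go_one f (f.length + 1) (by omega) [] []]
  cases h : pvSplit1 f <;> simp

def pvDelta (p : List Char) : Int := (p.count '<' : Int) - (p.count '>' : Int)

theorem pv_spec_append (p : List Char) : ∀ (m : List Char) (d : Int), ',' ∉ p →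
    pvSpec (p ++ m) d =
      ((p ++ (pvSpec m (d + pvDelta p)).1), (pvSpec m (d + pvDelta p)).2) := by
  induction p with
  | nil => intro m d _; simp [pvDelta]
  | cons c p' ih =>
    intro m d hcf
    have hc : ¬ (c = ',') := by intro h; exact hcf (by simp [h])
    have hcf' : ',' ∉ p' := fun h => hcf (List.mem_cons_of_mem _ h)
    rw [List.cons_append, pvSpec]
    simp only [if_neg (by tauto : ¬ (c = ',' ∧ d = 0))]
    set d' := if c = '<' then d + 1 else if c = '>' then d - 1 else d with hd'
    rw [ih m d' hcf']
    have : d' + pvDelta p' = d + pvDelta (c :: p') := by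
      simp only [pvDelta, List.count_cons, hd']
      by_cases h1 : c = '<' <;> by_cases h2 : c = '>' <;>
        simp [h1, h2] <;> push_cast <;> first | omega | (try simp_all) <;> omega
    rw [this]
    simp

def pvJoin (h : List Char) (t : List (List Char)) : List Char :=
  match t with
  | [] => h
  | x :: xs => h ++ ',' :: pvJoin x xs

theorem pv_join_cons (c : Char) (h : List Char) (t : List (List Char)) :
    pvJoin (c :: h) t = c :: pvJoin h t := by
  cases t <;> simp [pvJoin]

theorem pv_pieces_join (l : List Char) :
    pvJoin (pvPieces l).1 (pvPieces l).2 = l := by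
  induction l with
  | nil => simp [pvPieces, pvJoin]
  | cons c r ih =>
    by_cases hc : c = ','
    · simp only [pvPieces, if_pos hc, hc]
      simp [pvJoin, ih]
    · simp only [pvPieces, if_neg hc]
      rw [pv_join_cons, ih]

theorem pv_pieces_cf (l : List Char) :
    ',' ∉ (pvPieces l).1 ∧ ∀ p ∈ (pvPieces l).2, ',' ∉ p := by
  induction l with
  | nil => simp [pvPieces]
  | cons c r ih =>
    by_cases hc : c = ','
    · simp only [pvPieces, if_pos hc]
      refine ⟨by simp, ?_⟩
      intro p hp
      rcases List.mem_cons.mp hp with h | h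
      · rw [h]; exact ih.1
      · exact ih.2 p h
    · simp only [pvPieces, if_neg hc]
      refine ⟨?_, ih.2⟩
      simp only [List.mem_cons, not_or]
      exact ⟨Ne.symm (by simpa [eq_comm] using hc), ih.1⟩

def pvToksOf (h : List Char) (t : List (List Char)) : List (List Char) :=
  match t with
  | [] => if h = [] then [] else [h]
  | x :: xs => h :: pvToksOf x xs

theorem pv_runA (l : List Char) : ∀ (toks : List (List Char)) (cur : List Char) (d : Int),
    (let st := l.foldl pvAStep (toks, cur, d);
     if st.2.1 ≠ [] then st.1 ++ [st.2.1] else st.1)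
      = toks ++ pvToksOf (cur ++ (pvSpec l d).1) (pvSpec l d).2 := by
  induction l with
  | nil =>
    intro toks cur d
    simp only [List.foldl_nil, pvSpec, pvToksOf, List.append_nil]
    by_cases h : cur = [] <;> simp [h]
  | cons c r ih =>
    intro toks cur d
    rw [List.foldl_cons]
    by_cases h1 : c = '<'
    · rw [show pvAStep (toks, cur, d) c = (toks, cur ++ [c], d + 1) by simp [pvAStep, h1]]
      rw [ih toks (cur ++ [c]) (d + 1)]
      rw [show pvSpec (c :: r) d = ((c :: (pvSpec r (d+1)).1), (pvSpec r (d+1)).2) by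
        rw [pvSpec]; simp [h1]]
      simp
    · by_cases h2 : c = '>'
      · rw [show pvAStep (toks, cur, d) c = (toks, cur ++ [c], d - 1) by simp [pvAStep, h1, h2]]
        rw [ih toks (cur ++ [c]) (d - 1)]
        rw [show pvSpec (c :: r) d = ((c :: (pvSpec r (d-1)).1), (pvSpec r (d-1)).2) by
          rw [pvSpec]; simp [h1, h2]]
        simp
      · by_cases h3 : c = ',' ∧ d = 0
        · rw [show pvAStep (toks, cur, d) c = (toks ++ [cur], [], d) by
            simp [pvAStep, h1, h2, h3]]
          rw [ih (toks ++ [cur]) [] d]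
          rw [show pvSpec (c :: r) d = ([], (pvSpec r d).1 :: (pvSpec r d).2) by
            rw [pvSpec]; simp [h3]]
          simp [pvToksOf]
        · rw [show pvAStep (toks, cur, d) c = (toks, cur ++ [c], d) by
            simp [pvAStep, h1, h2, h3]]
          rw [ih toks (cur ++ [c]) d]
          rw [show pvSpec (c :: r) d = ((c :: (pvSpec r d).1), (pvSpec r d).2) by
            rw [pvSpec]; simp [h1, h2, h3]]
          simp

def pvRunB (ps : List (List Char)) (st : List (List Char) × Option (List Char) × Int) :
    List (List Char) :=
  match ps.foldl pvBStep st with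
  | (toks, some b, _) => toks ++ [b]
  | (toks, none, _) => toks

theorem pv_runB (ps : List (List Char)) : (∀ p ∈ ps, ',' ∉ p) →
    (∀ toks, pvRunB ps (toks, none, 0) =
      toks ++ (match ps with
        | [] => []
        | p :: ps' => (pvSpec (pvJoin p ps') 0).1 :: (pvSpec (pvJoin p ps') 0).2))
    ∧ (∀ toks b d, d ≠ 0 → pvRunB ps (toks, some b, d) =
      toks ++ (match ps with
        | [] => [b]
        | p :: ps' => (b ++ (pvSpec (',' :: pvJoin p ps') d).1)
            :: (pvSpec (',' :: pvJoin p ps') d).2)) := by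
  induction ps with
  | nil => intro _; exact ⟨fun toks => by simp [pvRunB], fun toks b d _ => by simp [pvRunB]⟩
  | cons p ps' ih =>
    intro hcf
    have hp : ',' ∉ p := hcf p (by simp)
    have hps' : ∀ q ∈ ps', ',' ∉ q := fun q hq => hcf q (List.mem_cons_of_mem _ hq)
    obtain ⟨iha, ihb⟩ := ih hps'
    have hcount : ∀ (d : Int), d + (PySem.Chars.count p ['<'] : Int) -
        (PySem.Chars.count p ['>'] : Int) = d + pvDelta p := by
      intro d; simp only [pv_count_single, pvDelta]; omega
    constructor
    · intro toks
      have hstep : pvBStep (toks, none, 0) p =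
          (if (0 : Int) + pvDelta p = 0 then ((toks ++ [p], none, 0 + pvDelta p))
           else (toks, some p, 0 + pvDelta p)) := by
        simp only [pvBStep, hcount 0]
      rw [pvRunB, List.foldl_cons, hstep]
      show _ = toks ++ (pvSpec (pvJoin p ps') 0).1 :: (pvSpec (pvJoin p ps') 0).2
      by_cases hd : (0 : Int) + pvDelta p = 0
      · rw [if_pos hd, hd]
        have := iha (toks ++ [p])
        rw [pvRunB] at this
        rw [this]
        cases ps' with
        | nil =>
          simp only [pvJoin]
          rw [show (p : List Char) = p ++ [] by simp, pv_spec_append p [] 0 hp]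
          simp [pvSpec]
        | cons q qs =>
          show toks ++ [p] ++ ((pvSpec (pvJoin q qs) 0).1 :: (pvSpec (pvJoin q qs) 0).2) = _
          simp only [pvJoin]
          rw [pv_spec_append p (',' :: pvJoin q qs) 0 hp, hd]
          rw [show pvSpec (',' :: pvJoin q qs) 0
              = ([], (pvSpec (pvJoin q qs) 0).1 :: (pvSpec (pvJoin q qs) 0).2) by
            rw [pvSpec]; simp]
          simp
      · rw [if_neg hd]
        have := ihb toks p (0 + pvDelta p) hd
        rw [pvRunB] at this
        rw [this]
        cases ps' with
        | nil =>
          simp only [pvJoin]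
          rw [show (p : List Char) = p ++ [] by simp, pv_spec_append p [] 0 hp]
          simp [pvSpec]
        | cons q qs =>
          show toks ++ (p ++ (pvSpec (',' :: pvJoin q qs) (0 + pvDelta p)).1)
              :: (pvSpec (',' :: pvJoin q qs) (0 + pvDelta p)).2 = _
          simp only [pvJoin]
          rw [pv_spec_append p (',' :: pvJoin q qs) 0 hp]
    · intro toks b d hd0
      have hstep : pvBStep (toks, some b, d) p =
          (if d + pvDelta p = 0 then ((toks ++ [b ++ [','] ++ p], none, d + pvDelta p))
           else (toks, some (b ++ [','] ++ p), d + pvDelta p)) := by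
        simp only [pvBStep, hcount d]
      rw [pvRunB, List.foldl_cons, hstep]
      show _ = toks ++ (b ++ (pvSpec (',' :: pvJoin p ps') d).1)
          :: (pvSpec (',' :: pvJoin p ps') d).2
      have hspecc : pvSpec (',' :: pvJoin p ps') d
          = ((',' :: (pvSpec (pvJoin p ps') d).1), (pvSpec (pvJoin p ps') d).2) := by
        rw [pvSpec]; simp [hd0]
      rw [hspecc]
      by_cases hd : d + pvDelta p = 0
      · rw [if_pos hd, hd]
        have := iha (toks ++ [b ++ [','] ++ p])
        rw [pvRunB] at this
        rw [this]
        cases ps' with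
        | nil =>
          simp only [pvJoin]
          rw [show (p : List Char) = p ++ [] by simp, pv_spec_append p [] d hp]
          simp [pvSpec]
        | cons q qs =>
          show toks ++ [b ++ [','] ++ p]
              ++ ((pvSpec (pvJoin q qs) 0).1 :: (pvSpec (pvJoin q qs) 0).2) = _
          simp only [pvJoin]
          rw [pv_spec_append p (',' :: pvJoin q qs) d hp, hd]
          rw [show pvSpec (',' :: pvJoin q qs) 0
              = ([], (pvSpec (pvJoin q qs) 0).1 :: (pvSpec (pvJoin q qs) 0).2) by
            rw [pvSpec]; simp]
          simp
      · rw [if_neg hd]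
        have := ihb toks (b ++ [','] ++ p) (d + pvDelta p) hd
        rw [pvRunB] at this
        rw [this]
        cases ps' with
        | nil =>
          simp only [pvJoin]
          rw [show (p : List Char) = p ++ [] by simp, pv_spec_append p [] d hp]
          simp [pvSpec]
        | cons q qs =>
          show toks ++ ((b ++ [','] ++ p) ++ (pvSpec (',' :: pvJoin q qs) (d + pvDelta p)).1)
              :: (pvSpec (',' :: pvJoin q qs) (d + pvDelta p)).2 = _
          simp only [pvJoin]
          rw [pv_spec_append p (',' :: pvJoin q qs) d hp]
          simp

theorem pv_field_eq (acc : List (String × String)) (t : List Char) :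
    pvAField acc t = pvBField acc t := by
  rw [pvAField, pvBField]
  set f := PySem.Chars.strip t with hf
  by_cases h0 : f = []
  · simp [h0]
  · rw [if_neg h0, if_neg h0]
    cases hs : pvSplit1 f with
    | none =>
      have hfind : PySem.Chars.find f [':'] = -1 := by rw [pv_find_split1, hs]
      rw [if_pos (by simp [PySem.Chars.isIn, hfind]), if_pos hfind]
    | some ab =>
      obtain ⟨a, b⟩ := ab
      have hfind : PySem.Chars.find f [':'] = (a.length : Int) := by rw [pv_find_split1, hs]
      have hdecomp : f = a ++ ':' :: b := pv_split1_decomp f a b hs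
      have hne : PySem.Chars.find f [':'] ≠ -1 := by rw [hfind]; omega
      rw [if_neg (by simp [PySem.Chars.isIn, hne]), if_neg hne]
      rw [pv_splitOnMax_one, hs]
      have htake : f.take (PySem.Chars.find f [':']).toNat = a := by
        rw [hfind, Int.toNat_natCast, hdecomp, List.take_left]
      have hdrop : f.drop ((PySem.Chars.find f [':']).toNat + 1) = b := by
        rw [hfind, Int.toNat_natCast, hdecomp]
        rw [show a ++ ':' :: b = (a ++ [':']) ++ b by simp]
        rw [show a.length + 1 = (a ++ [':']).length by simp]
        exact List.drop_left
      rw [htake, hdrop]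
      simp [PySem.List.pyGetD, PySem.List.pyGet?, PySem.List.pyIdx?]

theorem pv_bfield_nil (acc : List (String × String)) : pvBField acc [] = acc := by
  rw [pvBField]
  simp [PySem.Chars.strip, PySem.Chars.lstrip, PySem.Chars.rstrip]

theorem pv_fold_toksOf (t : List (List Char)) : ∀ (h : List Char) (acc : List (String × String)),
    (pvToksOf h t).foldl pvBField acc = (h :: t).foldl pvBField acc := by
  induction t with
  | nil =>
    intro h acc
    by_cases hh : h = [] <;> simp [pvToksOf, hh, pv_bfield_nil]
  | cons x xs ih =>
    intro h acc
    simp only [pvToksOf, List.foldl_cons]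
    exact ih x (pvBField acc h)

theorem pv_main (s : String) :
    (let st := s.toList.foldl pvAStep ([], [], 0)
     let tokens := if st.2.1 ≠ [] then st.1 ++ [st.2.1] else st.1
     tokens.foldl pvAField []) =
    (let pieces := PySem.Chars.splitOn s.toList [',']
     let st := pieces.foldl pvBStep ([], none, 0)
     let tokens := match st with
       | (toks, some b, _) => toks ++ [b]
       | (toks, none, _) => toks
     tokens.foldl pvBField []) := by
  have hA := pv_runA s.toList [] [] 0
  simp only at hA ⊢
  rw [hA]
  have hfields : ∀ (ts : List (List Char)) (acc : List (String × String)),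
      ts.foldl pvAField acc = ts.foldl pvBField acc := by
    intro ts acc
    have : pvAField = pvBField := funext fun acc => funext fun t => pv_field_eq acc t
    rw [this]
  rw [hfields]
  simp only [List.nil_append]
  rw [pv_fold_toksOf]
  -- B side
  rw [pv_splitOn_comma]
  have hcf := pv_pieces_cf s.toList
  have hB := (pv_runB ((pvPieces s.toList).1 :: (pvPieces s.toList).2)
      (by intro p hp; rcases List.mem_cons.mp hp with h | h
          · rw [h]; exact hcf.1
          · exact hcf.2 p h)).1 []
  rw [pvRunB] at hB
  have hB2 : (match List.foldl pvBStep ([], none, 0)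
        ((pvPieces s.toList).1 :: (pvPieces s.toList).2) with
      | (toks, some b, _) => toks ++ [b]
      | (toks, none, _) => toks)
      = (pvSpec s.toList 0).1 :: (pvSpec s.toList 0).2 := by
    rw [hB]
    show [] ++ ((pvSpec (pvJoin (pvPieces s.toList).1 (pvPieces s.toList).2) 0).1
        :: (pvSpec (pvJoin (pvPieces s.toList).1 (pvPieces s.toList).2) 0).2) = _
    rw [pv_pieces_join]
    simp
  rw [hB2]

-- ===== VERDICT (by name: the statement is the Claim_ definition above) =====
theorem parse_fields_string_spec : Claim_equal_parse_fields_string := by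
  intro fields_str _ _
  show parse_fields_string fields_str = parse_fields_string_alt fields_str
  exact pv_main fields_str
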